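-- pv_equiv track=rewrite | github.com/jwalanta/adventofcode | 2019/04/day04.py | adjacent2
-- ===== SOURCE A (Python) =====
-- def adjacent2(n_str):
--     prev = ''
--     count = 0
--     adjacent_count = 0
--     for s in n_str:
--         if prev == s:
--             count = count + 1
--         else:
--             # adjacent digits with length > 2 are part of big group. ignore
--             if count == 2:
--                 adjacent_count = adjacent_count + 1
--
--             prev = s
--             count = 1
--
--     # count adjacent digits at the end
--     if count == 2:
--         adjacent_count = adjacent_count + 1
--
--     return adjacent_count > 0
-- ===== SOURCE B (Python) =====
-- def adjacent2(n_str):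
--     n = len(n_str)
--
--     def starts_exact_pair(i):
--         # a maximal run of length exactly 2 starts at i
--         return (n_str[i] == n_str[i + 1]
--                 and (i == 0 or n_str[i - 1] != n_str[i])
--                 and (i + 2 == n or n_str[i + 2] != n_str[i]))
--
--     return any(starts_exact_pair(i) for i in range(n - 1))
-- ===== Notes on version B (the rewrite author's own statement) =====
-- stated objective: alternative
-- what changed: Replaced A's prev/count/adjacent_count run-length state machine (with end-of-string flush) by a stateless positional test: any() over indices i of a local neighborhood comparison deciding whether a maximal run of length exactly 2 starts at i; any() short-circuits at the first hit while A always scans the whole string.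
import Mathlib
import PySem

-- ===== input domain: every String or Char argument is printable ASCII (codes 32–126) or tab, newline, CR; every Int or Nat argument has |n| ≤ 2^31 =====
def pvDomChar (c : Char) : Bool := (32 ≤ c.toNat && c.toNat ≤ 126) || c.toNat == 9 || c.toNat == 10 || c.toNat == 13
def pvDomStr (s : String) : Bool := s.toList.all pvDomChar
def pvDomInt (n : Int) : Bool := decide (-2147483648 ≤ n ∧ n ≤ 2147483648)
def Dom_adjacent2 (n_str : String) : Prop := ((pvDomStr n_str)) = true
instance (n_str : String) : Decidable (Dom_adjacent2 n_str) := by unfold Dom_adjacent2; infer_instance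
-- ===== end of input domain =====

-- B replaces A's prev/count/adjacent_count run-length state machine (with end-of-string flush)
-- by a stateless per-index neighborhood test: any index starts a maximal run of length exactly 2 (objective: alternative).

-- ===== PORT A =====
-- A's loop state: (prev, count, adjacent_count); prev = '' is modelled as none (never equal to a character).
def pvStepA (st : Option Char × Int × Int) (s : Char) : Option Char × Int × Int :=
  if st.1 == some s then (st.1, st.2.1 + 1, st.2.2)
  else (some s, 1, if st.2.1 == 2 then st.2.2 + 1 else st.2.2)

def adjacent2 (n_str : String) : Bool :=
  let st := n_str.toList.foldl pvStepA (none, 0, 0)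
  let adjacent_count := if st.2.1 == 2 then st.2.2 + 1 else st.2.2
  decide (adjacent_count > 0)

-- ===== PORT B =====
-- Source B's per-index test starts_exact_pair(i); all indexing is in range, ' ' is a never-used default.
def pvPosB (l : List Char) (i : Nat) : Bool :=
  (l.getD i ' ' == l.getD (i + 1) ' ')
  && (decide (i = 0) || !(l.getD (i - 1) ' ' == l.getD i ' '))
  && (decide (i + 2 = l.length) || !(l.getD (i + 2) ' ' == l.getD i ' '))

def adjacent2_alt (n_str : String) : Bool :=
  (List.range (n_str.toList.length - 1)).any (pvPosB n_str.toList)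

-- ===== PRECONDITION & SPEC =====
def Spec_adjacent2 (n_str : String) (out : Bool) : Prop := out = adjacent2_alt n_str
instance (n_str : String) (out : Bool) : Decidable (Spec_adjacent2 n_str out) := by unfold Spec_adjacent2; infer_instance

-- ===== CLAIM (what is proved, stated in full; the proofs are below) =====
def Claim_equal_adjacent2 : Prop := ∀ (n_str : String), Dom_adjacent2 n_str → Spec_adjacent2 n_str (adjacent2 n_str)

-- ===== LEMMAS AND PROOFS =====

-- Proof-side intermediate: a run scan ("some maximal run has length exactly 2"); both ports are proved equal to it.
def pvScanB : List Char → Bool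
  | [] => false
  | c :: rest =>
    if (rest.takeWhile (· == c)).length + 1 = 2 then true
    else pvScanB (rest.dropWhile (· == c))
termination_by l => l.length
decreasing_by
  exact Nat.lt_succ_of_le (List.length_dropWhile_le _ _)

theorem pvScanB_nil : pvScanB [] = false := by rw [pvScanB]

-- A's finish step (the flush after the loop), as a function of the final state.
def pvFinishA (st : Option Char × Int × Int) : Bool :=
  decide ((if st.2.1 == 2 then st.2.2 + 1 else st.2.2) > 0)

-- Mid-run invariant for A's fold.
theorem pvKeyA (l : List Char) (c : Char) (k : Nat) (adj : Int) (hk : 1 ≤ k) (ha : 0 ≤ adj) :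
    pvFinishA (l.foldl pvStepA (some c, (k : Int), adj))
      = (decide (0 < adj) ||
          (if (l.takeWhile (· == c)).length + k = 2 then true
           else pvScanB (l.dropWhile (· == c)))) := by
  induction l generalizing c k adj with
  | nil =>
    simp only [List.foldl_nil, List.takeWhile_nil, List.dropWhile_nil, pvFinishA, pvScanB,
      List.length_nil, Nat.zero_add]
    by_cases h : k = 2
    · subst h
      have h1 : adj + 1 > 0 := by omega
      simp [h1]
    · have h2 : ((k : Int)) ≠ 2 := by exact_mod_cast h
      simp [h, h2]
  | cons x xs ih =>
    by_cases hx : x = c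
    · subst hx
      have hstep : pvStepA (some x, (k : Int), adj) x = (some x, ((k + 1 : Nat) : Int), adj) := by
        have hcast : ((k + 1 : Nat) : Int) = (k : Int) + 1 := by push_cast; ring
        simp [pvStepA, hcast]
      rw [List.foldl_cons, hstep, ih x (k + 1) adj (by omega) ha]
      simp only [List.takeWhile_cons, List.dropWhile_cons, beq_self_eq_true, if_true]
      have harith : ((xs.takeWhile (· == x)).length + 1) + k
          = (xs.takeWhile (· == x)).length + (k + 1) := by omega
      simp [List.length_cons, harith]
    · have hbeq : (x == c) = false := by simp [hx]
      have hbeq' : ((some c : Option Char) == some x) = false := by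
        simp [Ne.symm hx]
      have hstep : pvStepA (some c, (k : Int), adj) x
          = (some x, ((1 : Nat) : Int), if (k : Int) == 2 then adj + 1 else adj) := by
        simp [pvStepA, hbeq']
      have hadj' : (0:Int) ≤ (if (k : Int) == 2 then adj + 1 else adj) := by
        split <;> omega
      rw [List.foldl_cons, hstep, ih x 1 _ (by omega) hadj']
      simp only [List.takeWhile_cons, List.dropWhile_cons, hbeq]
      have hscan : pvScanB (x :: xs)
          = (if (xs.takeWhile (· == x)).length + 1 = 2 then true
             else pvScanB (xs.dropWhile (· == x))) := by
        rw [pvScanB]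
      by_cases hk2 : k = 2
      · subst hk2
        simp; omega
      · have : ((k : Int)) ≠ 2 := by exact_mod_cast hk2
        simp only [if_false, beq_iff_eq, this]
        cases h2 : decide ((xs.takeWhile (· == x)).length + 1 = 2) <;>
          simp_all

theorem pvA_eq_scan (s : String) :
    adjacent2 s = pvScanB s.toList := by
  unfold adjacent2
  cases hl : s.toList with
  | nil => rw [pvScanB_nil]; decide
  | cons c rest =>
    have hstep : pvStepA (none, 0, 0) c = (some c, ((1:Nat) : Int), (0:Int)) := by
      simp [pvStepA]
    have := pvKeyA rest c 1 0 (le_refl 1) (le_refl 0)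
    show pvFinishA (List.foldl pvStepA (none, 0, 0) (c :: rest)) = _
    simp only [List.foldl_cons, hstep]
    rw [this, pvScanB]
    simp

-- getD facts for the run decomposition l = c :: (t ++ d), all of t equal to c.
theorem pvGetRun (t : List Char) (c : Char) (d : List Char) (j : Nat)
    (ht : ∀ x ∈ t, x = c) (hj : j ≤ t.length) :
    (c :: (t ++ d)).getD j ' ' = c := by
  cases j with
  | zero => rfl
  | succ j =>
    have hjl : j < t.length := by omega
    have : (t ++ d).getD j ' ' = t.getD j ' ' := by
      simp [List.getD, List.getElem?_append_left hjl]
    simp only [List.getD_cons_succ, this]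
    have := List.getElem_mem (l := t) (n := j) hjl
    simp [List.getD, List.getElem?_eq_getElem hjl, ht _ this]

theorem pvGetShift (t : List Char) (c : Char) (d : List Char) (j : Nat) :
    (c :: (t ++ d)).getD (t.length + 1 + j) ' ' = d.getD j ' ' := by
  have h1 : t.length + 1 + j = (t.length + j) + 1 := by omega
  rw [h1, List.getD_cons_succ]
  simp [List.getD, List.getElem?_append_right (by omega : t.length ≤ t.length + j)]

-- The head of dropWhile p, if any, falsifies p.
theorem pvHeadDrop {A : Type} (p : A → Bool) (l : List A) :
    ∀ y ∈ (l.dropWhile p).head?, p y = false := by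
  induction l with
  | nil => simp
  | cons a l ih =>
    intro y hy
    by_cases hpa : p a = true
    · rw [List.dropWhile_cons_of_pos hpa] at hy
      exact ih y hy
    · rw [List.dropWhile_cons_of_neg (by simpa using hpa)] at hy
      simp at hy
      subst hy
      simpa using hpa

-- any over a range where every positive index is false.
theorem pvAnyRange (m : Nat) (f : Nat → Bool) (h : ∀ i, 1 ≤ i → i < m → f i = false) :
    (List.range m).any f = (decide (0 < m) && f 0) := by
  induction m with
  | zero => simp
  | succ k ih =>
    rw [List.range_succ, List.any_append]
    cases k with
    | zero => simp
    | succ k' =>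
      rw [ih (fun i h1 h2 => h i h1 (by omega))]
      have hk : f (k' + 1) = false := h _ (by omega) (by omega)
      simp [hk]

-- Position 0 starts an exactly-2 run iff the first run has length 2.
theorem pvPos0 (c : Char) (t d : List Char) (ht : ∀ x ∈ t, x = c)
    (hd : ∀ x ∈ d.head?, (x == c) = false) :
    pvPosB (c :: (t ++ d)) 0 = decide (t.length = 1) := by
  cases t with
  | nil =>
    cases d with
    | nil =>
      show pvPosB [c] 0 = decide ((0:Nat) = 1)
      unfold pvPosB
      cases hcc : (c == ' ') with
      | true => have := eq_of_beq hcc; subst this; simp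
      | false => simp [List.getD, hcc]
    | cons x d' =>
      have hx : (x == c) = false := hd x (by simp)
      have hcx : (c == x) = false := by
        cases hcx : (c == x) with
        | true => exact absurd (eq_of_beq hcx) (by intro h; rw [h] at hcx; simp_all)
        | false => rfl
      unfold pvPosB
      simp [List.getD, hcx]
  | cons a t' =>
    have hac : a = c := ht a (by simp)
    subst hac
    cases t' with
    | nil =>
      cases d with
      | nil =>
        show pvPosB [a, a] 0 = _
        unfold pvPosB
        simp [List.getD]
      | cons x d' =>
        have hx : (x == a) = false := hd x (by simp)
        unfold pvPosB
        simp [List.getD, hx]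
    | cons b t'' =>
      have hbc : b = a := ht b (by simp)
      subst hbc
      unfold pvPosB
      simp [List.getD]

-- Positions inside the first run (but not its start) never qualify.
theorem pvPosRun (c : Char) (t d : List Char) (i : Nat) (ht : ∀ x ∈ t, x = c)
    (h1 : 1 ≤ i) (h2 : i ≤ t.length) :
    pvPosB (c :: (t ++ d)) i = false := by
  have ha := pvGetRun t c d i ht h2
  have hb := pvGetRun t c d (i - 1) ht (by omega)
  unfold pvPosB
  rw [ha, hb]
  have : decide (i = 0) = false := by simp; omega
  simp [this]

-- Positions past the first run coincide with the positions of the tail list.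
theorem pvPosShift (c : Char) (t : List Char) (x : Char) (d' : List Char)
    (ht : ∀ x ∈ t, x = c) (hx : (x == c) = false) (j : Nat) :
    pvPosB (c :: (t ++ (x :: d'))) (t.length + 1 + j) = pvPosB (x :: d') j := by
  have len : (c :: (t ++ (x :: d'))).length = t.length + 1 + (x :: d').length := by
    simp; omega
  have g0 := pvGetShift t c (x :: d') j
  have g1 : (c :: (t ++ (x :: d'))).getD (t.length + 1 + j + 1) ' ' = (x :: d').getD (j + 1) ' ' := by
    have := pvGetShift t c (x :: d') (j + 1)
    rw [show t.length + 1 + (j + 1) = t.length + 1 + j + 1 by omega] at this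
    exact this
  have g2 : (c :: (t ++ (x :: d'))).getD (t.length + 1 + j + 2) ' ' = (x :: d').getD (j + 2) ' ' := by
    have := pvGetShift t c (x :: d') (j + 2)
    rw [show t.length + 1 + (j + 2) = t.length + 1 + j + 2 by omega] at this
    exact this
  have hlen : decide (t.length + 1 + j + 2 = (c :: (t ++ (x :: d'))).length)
      = decide (j + 2 = (x :: d').length) := by
    rw [len]; exact decide_eq_decide.mpr (by omega)
  unfold pvPosB
  rw [g0, g1, g2, hlen]
  cases j with
  | zero =>
    have hmid := pvGetRun t c (x :: d') t.length ht (le_refl _)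
    rw [show t.length + 1 + 0 - 1 = t.length by omega, hmid]
    have hcx : (c == x) = false := by
      cases hcx : (c == x) with
      | true => exact absurd (eq_of_beq hcx) (by intro h; rw [h] at hx; simp_all)
      | false => rfl
    have hd0 : (x :: d').getD 0 ' ' = x := rfl
    rw [hd0]
    simp [hcx]
  | succ j' =>
    have gm : (c :: (t ++ (x :: d'))).getD (t.length + 1 + (j' + 1) - 1) ' '
        = (x :: d').getD j' ' ' := by
      have := pvGetShift t c (x :: d') j'
      rw [show t.length + 1 + (j' + 1) - 1 = t.length + 1 + j' by omega]
      exact this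
    rw [gm]
    have : decide (t.length + 1 + (j' + 1) = 0) = false := by simp
    rw [this]
    simp

-- Combined step: the positional any over c :: (t ++ d) for one run decomposition.
theorem pvBridgeAux (c : Char) (t d : List Char) (ht : ∀ x ∈ t, x = c)
    (hd : ∀ x ∈ d.head?, (x == c) = false)
    (hih : (List.range (d.length - 1)).any (pvPosB d) = pvScanB d) :
    (List.range ((c :: (t ++ d)).length - 1)).any (pvPosB (c :: (t ++ d)))
      = (if t.length + 1 = 2 then true else pvScanB d) := by
  have hlen : (c :: (t ++ d)).length - 1 = t.length + d.length := by simp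
  rw [hlen]
  cases d with
  | nil =>
    simp only [List.length_nil, Nat.add_zero]
    have haux : ∀ i, 1 ≤ i → i < t.length → pvPosB (c :: (t ++ [])) i = false :=
      fun i h1 h2 => pvPosRun c t [] i ht h1 (Nat.le_of_lt h2)
    rw [pvAnyRange _ _ haux]
    rw [pvPos0 c t [] ht (by simp)]
    by_cases h : t.length = 1
    · simp [h]
    · have h2 : ¬ (t.length + 1 = 2) := by omega
      simp [h, h2, pvScanB_nil]
  | cons x d' =>
    have hx : (x == c) = false := hd x (by simp)
    rw [show t.length + (x :: d').length = (t.length + 1) + d'.length by simp; omega]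
    rw [List.range_add, List.any_append, List.any_map]
    have haux : ∀ i, 1 ≤ i → i < t.length + 1 → pvPosB (c :: (t ++ (x :: d'))) i = false :=
      fun i h1 h2 => pvPosRun c t (x :: d') i ht h1 (by omega)
    rw [pvAnyRange _ _ haux]
    rw [pvPos0 c t (x :: d') ht hd]
    have hcomp : (pvPosB (c :: (t ++ (x :: d'))) ∘ fun j => t.length + 1 + j)
        = pvPosB (x :: d') := by
      funext j
      exact pvPosShift c t x d' ht hx j
    rw [hcomp]
    have hd' : (x :: d').length - 1 = d'.length := by simp
    rw [hd'] at hih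
    rw [hih]
    by_cases h : t.length = 1
    · simp [h]
    · have : ¬ (t.length + 1 = 2) := by omega
      simp [h, this]

-- The main bridge: the positional any equals the run scan.
theorem pvBridge (l : List Char) :
    (List.range (l.length - 1)).any (pvPosB l) = pvScanB l := by
  induction hn : l.length using Nat.strong_induction_on generalizing l with
  | _ n ih =>
  cases l with
  | nil =>
    subst hn
    simp [pvScanB_nil]
  | cons c r =>
    have ht : ∀ x ∈ r.takeWhile (· == c), x = c := by
      intro x hx
      have h' := List.mem_takeWhile_imp (p := fun y => y == c) hx
      exact eq_of_beq h'
    have hd : ∀ x ∈ (r.dropWhile (· == c)).head?, (x == c) = false :=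
      pvHeadDrop (fun y => y == c) r
    have hih : (List.range ((r.dropWhile (· == c)).length - 1)).any (pvPosB (r.dropWhile (· == c)))
        = pvScanB (r.dropWhile (· == c)) := by
      have hlt : (r.dropWhile (· == c)).length < n := by
        subst hn
        exact Nat.lt_succ_of_le (List.length_dropWhile_le _ _)
      exact ih _ hlt _ rfl
    have hsplit : r.takeWhile (· == c) ++ r.dropWhile (· == c) = r :=
      List.takeWhile_append_dropWhile
    have := pvBridgeAux c (r.takeWhile (· == c)) (r.dropWhile (· == c)) ht hd hih
    rw [hsplit] at this
    rw [← hn, this, pvScanB]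

-- ===== VERDICT (by name: the statement is the Claim_ definition above) =====
theorem adjacent2_spec : Claim_equal_adjacent2 := by
  intro n_str _
  unfold Spec_adjacent2 adjacent2_alt
  rw [pvBridge, pvA_eq_scan]
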